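-- pv_equiv track=rewrite | github.com/7anooch/video-annotator | gen_ground_truth.py | count_frame_labels
-- ===== SOURCE A (Python) =====
-- def count_frame_labels(all_annotations, min_length):
--     frame_label_counts = {frame: {} for frame in range(min_length)}
--
--     for annotations in all_annotations.values():
--         for frame, label in annotations.items():
--             if frame >= min_length:
--                 continue
--             if frame not in frame_label_counts:
--                 frame_label_counts[frame] = {}
--             if label not in frame_label_counts[frame]:
--                 frame_label_counts[frame][label] = 0
--             frame_label_counts[frame][label] += 1
--
--     return frame_label_counts
-- ===== SOURCE B (Python) =====
-- def count_frame_labels(all_annotations, min_length):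
--     pairs = [(frame, label)
--              for annotations in all_annotations.values()
--              for frame, label in annotations.items()
--              if frame < min_length]
--     counts = {}
--     for key in pairs:
--         counts[key] = counts.get(key, 0) + 1
--     result = {frame: {} for frame in range(min_length)}
--     for (frame, label), n in counts.items():
--         result.setdefault(frame, {})[label] = n
--     return result
-- ===== Notes on version B (the rewrite author's own statement) =====
-- stated objective: alternative
-- what changed: B flattens all annotations into one flat list of (frame,label) pairs, builds a single flat histogram keyed by the pair, and then reshapes that histogram into the seeded per-frame nested dicts, instead of A's in-place nested-dict mutation inside the double loop.
import Mathlib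
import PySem

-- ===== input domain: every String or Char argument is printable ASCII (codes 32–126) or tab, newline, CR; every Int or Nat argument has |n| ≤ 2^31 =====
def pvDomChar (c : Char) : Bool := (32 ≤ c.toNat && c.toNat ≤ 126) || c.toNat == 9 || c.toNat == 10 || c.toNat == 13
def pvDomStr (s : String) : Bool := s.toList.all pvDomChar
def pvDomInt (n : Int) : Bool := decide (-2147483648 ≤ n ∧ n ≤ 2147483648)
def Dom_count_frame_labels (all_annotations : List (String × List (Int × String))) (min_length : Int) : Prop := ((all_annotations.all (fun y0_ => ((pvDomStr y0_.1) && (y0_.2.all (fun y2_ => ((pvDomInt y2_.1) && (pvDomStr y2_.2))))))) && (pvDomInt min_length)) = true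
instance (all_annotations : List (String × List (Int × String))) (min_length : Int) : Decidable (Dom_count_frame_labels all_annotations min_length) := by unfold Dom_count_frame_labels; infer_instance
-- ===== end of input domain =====

-- B builds one flat (frame,label) histogram and reshapes it into the seeded nested
-- per-frame dicts, instead of A's nested-dict mutation inside the double loop
-- (alternative decomposition, same cost).

-- ===== PORT A =====
def count_frame_labels (all_annotations : List (String × List (Int × String))) (min_length : Int) : List (Int × List (String × Int)) :=
  -- frame_label_counts = {frame: {} for frame in range(min_length)}
  let init : PySem.Dict Int (PySem.Dict String Int) :=
    (PySem.List.pyRange 0 min_length 1).foldl (fun d frame => d.insert frame PySem.Dict.empty) PySem.Dict.empty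
  let frame_label_counts :=
    all_annotations.foldl (fun acc kv =>
      kv.2.foldl (fun acc fl =>
        if fl.1 ≥ min_length then acc         -- continue
        else
          let acc1 := if acc.contains fl.1 then acc else acc.insert fl.1 PySem.Dict.empty
          let sub := acc1.getD fl.1 PySem.Dict.empty
          let sub1 := if sub.contains fl.2 then sub else sub.insert fl.2 0
          -- frame_label_counts[frame][label] += 1  (the key was just ensured present, so getD is exact)
          acc1.insert fl.1 (sub1.insert fl.2 (sub1.getD fl.2 0 + 1))) acc) init
  frame_label_counts.items.map (fun p => (p.1, p.2.items))

-- ===== PORT B =====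
def count_frame_labels_alt (all_annotations : List (String × List (Int × String))) (min_length : Int) : List (Int × List (String × Int)) :=
  -- pairs = [(frame, label) for annotations in all_annotations.values() for frame, label in annotations.items() if frame < min_length]
  let pairs : List (Int × String) :=
    all_annotations.flatMap (fun kv => kv.2.filter (fun fl => decide (fl.1 < min_length)))
  -- counts = {}; for key in pairs: counts[key] = counts.get(key, 0) + 1
  let counts : PySem.Dict (Int × String) Int :=
    pairs.foldl (fun c key => c.insert key (c.getD key 0 + 1)) PySem.Dict.empty
  -- result = {frame: {} for frame in range(min_length)}
  let init : PySem.Dict Int (PySem.Dict String Int) :=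
    (PySem.List.pyRange 0 min_length 1).foldl (fun d frame => d.insert frame PySem.Dict.empty) PySem.Dict.empty
  -- for (frame, label), n in counts.items(): result.setdefault(frame, {})[label] = n
  let result :=
    counts.items.foldl (fun acc q =>
      let acc1 := acc.setdefault q.1.1 PySem.Dict.empty
      acc1.insert q.1.1 ((acc1.getD q.1.1 PySem.Dict.empty).insert q.1.2 q.2)) init
  result.items.map (fun p => (p.1, p.2.items))

-- ===== PRECONDITION & SPEC =====
def Spec_count_frame_labels (all_annotations : List (String × List (Int × String))) (min_length : Int) (out : List (Int × List (String × Int))) : Prop := out = count_frame_labels_alt all_annotations min_length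
instance (all_annotations : List (String × List (Int × String))) (min_length : Int) (out : List (Int × List (String × Int))) : Decidable (Spec_count_frame_labels all_annotations min_length out) := by unfold Spec_count_frame_labels; infer_instance

-- ===== CLAIM (what is proved, stated in full; the proofs are below) =====
def Claim_equal_count_frame_labels : Prop := ∀ (all_annotations : List (String × List (Int × String))) (min_length : Int), Dom_count_frame_labels all_annotations min_length → Spec_count_frame_labels all_annotations min_length (count_frame_labels all_annotations min_length)

-- ===== LEMMAS AND PROOFS =====

-- the flattened stream of admitted (frame, label) pairs, in program order
def pvPairs (all_annotations : List (String × List (Int × String))) (m : Int) : List (Int × String) :=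
  all_annotations.flatMap (fun kv => kv.2.filter (fun fl => decide (fl.1 < m)))

-- the labels recorded for frame f, in stream order
def pvLabels (pairs : List (Int × String)) (f : Int) : List String :=
  (pairs.filter (fun q => q.1 == f)).map (·.2)

def pvSeedKeys (m : Int) : List Int := PySem.List.pyRange 0 m 1

def pvSeed (m : Int) : PySem.Dict Int (PySem.Dict String Int) :=
  (pvSeedKeys m).foldl (fun d frame => d.insert frame PySem.Dict.empty) PySem.Dict.empty

-- the common normal form of both programs' result dict
def pvModel (m : Int) (pairs : List (Int × String)) : PySem.Dict Int (PySem.Dict String Int) :=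
  PySem.Dict.mk ((PySem.Set.update (pvSeedKeys m) (pairs.map (·.1))).map
    (fun f => (f, PySem.Dict.counter (pvLabels pairs f))))

-- A's loop body, simplified
def pvStepA (d : PySem.Dict Int (PySem.Dict String Int)) (p : Int × String) : PySem.Dict Int (PySem.Dict String Int) :=
  d.insert p.1 ((d.getD p.1 PySem.Dict.empty).insert p.2 ((d.getD p.1 PySem.Dict.empty).getD p.2 0 + 1))

-- B's reshape loop body, simplified
def pvStepB (d : PySem.Dict Int (PySem.Dict String Int)) (q : (Int × String) × Int) : PySem.Dict Int (PySem.Dict String Int) :=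
  d.insert q.1.1 ((d.getD q.1.1 PySem.Dict.empty).insert q.1.2 q.2)

-- B's reshape of a histogram over the distinct pairs S with counts cnt
def pvReshape (m : Int) (cnt : Int × String → Int) (S : List (Int × String)) : PySem.Dict Int (PySem.Dict String Int) :=
  PySem.Dict.mk ((PySem.Set.update (pvSeedKeys m) (S.map (·.1))).map
    (fun f => (f, PySem.Dict.mk ((S.filter (fun q => q.1 == f)).map (fun q => (q.2, cnt q))))))

theorem pvSet_add_of_mem {α : Type} [BEq α] [LawfulBEq α] (s : PySem.Set α) (x : α) (h : x ∈ s) : PySem.Set.add s x = s := by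
  simp [PySem.Set.add, PySem.Set.contains, h]

theorem pvSet_add_of_not_mem {α : Type} [BEq α] [LawfulBEq α] (s : PySem.Set α) (x : α) (h : x ∉ s) : PySem.Set.add s x = s ++ [x] := by
  simp [PySem.Set.add, PySem.Set.contains, h]

theorem pvOfList_append {α : Type} [BEq α] (u : List α) (x : α) :
    PySem.Set.ofList (u ++ [x]) = (PySem.Set.ofList u).add x := by
  simp [PySem.Set.ofList, List.foldl_append]

theorem pvUpdate_append (s : PySem.Set Int) (l : List Int) (x : Int) :
    PySem.Set.update s (l ++ [x]) = (PySem.Set.update s l).add x := by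
  simp [PySem.Set.update, List.foldl_append]

theorem pvNodup_seedKeys (m : Int) : (pvSeedKeys m).Nodup := by
  unfold pvSeedKeys PySem.List.pyRange
  split
  · exact List.nodup_nil
  · exact List.Nodup.map (fun a b h => by simpa using h) List.nodup_range

theorem pvGet?_mk_map {ν : Type} (K : List Int) (g : Int → ν) (f : Int) :
    (PySem.Dict.mk (K.map (fun k => (k, g k)))).get? f = if f ∈ K then some (g f) else none := by
  induction K with
  | nil => rfl
  | cons k ks ih =>
    rw [List.map_cons, PySem.Dict.get?_mk_cons, ih]
    by_cases h : k = f
    · subst h; simp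
    · simp [h, Ne.symm h]

theorem pvGetD_mk_map {ν : Type} (K : List Int) (g : Int → ν) (f : Int) (d0 : ν) :
    (PySem.Dict.mk (K.map (fun k => (k, g k)))).getD f d0 = if f ∈ K then g f else d0 := by
  rw [PySem.Dict.getD_eq_get?_getD, pvGet?_mk_map]
  by_cases h : f ∈ K <;> simp [h]

theorem pvContains_mk_map {ν : Type} (K : List Int) (g : Int → ν) (f : Int) :
    (PySem.Dict.mk (K.map (fun k => (k, g k)))).contains f = decide (f ∈ K) := by
  rw [PySem.Dict.contains_eq_isSome_get?, pvGet?_mk_map]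
  by_cases h : f ∈ K <;> simp [h]

theorem pvFilterKey_append (T : List (Int × String)) (p : Int × String) (f : Int) :
    (T ++ [p]).filter (fun q => q.1 == f) = T.filter (fun q => q.1 == f) ++ (if p.1 = f then [p] else []) := by
  rw [List.filter_append]
  congr 1
  by_cases h : p.1 = f <;> simp [h]

theorem pvLabels_append (xs : List (Int × String)) (x : Int × String) (k : Int) :
    pvLabels (xs ++ [x]) k = pvLabels xs k ++ (if x.1 = k then [x.2] else []) := by
  unfold pvLabels
  rw [pvFilterKey_append, List.map_append]
  congr 1
  by_cases h : x.1 = k <;> simp [h]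

theorem pvBump (s : PySem.Dict String Int) (l : String) :
    (if s.contains l then s else s.insert l 0).insert l
      ((if s.contains l then s else s.insert l 0).getD l 0 + 1) = s.insert l (s.getD l 0 + 1) := by
  by_cases h : s.contains l = true
  · simp only [h, if_true]
  · simp only [h, Bool.false_eq_true, if_false, PySem.Dict.getD_insert_self,
      PySem.Dict.insert_insert_self]
    rw [PySem.Dict.getD_of_not_contains s 0 (by simpa using h)]

theorem pvStepA_eq (d : PySem.Dict Int (PySem.Dict String Int)) (fl : Int × String) :
    (let acc1 := if d.contains fl.1 then d else d.insert fl.1 PySem.Dict.empty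
     let sub := acc1.getD fl.1 PySem.Dict.empty
     let sub1 := if sub.contains fl.2 then sub else sub.insert fl.2 0
     acc1.insert fl.1 (sub1.insert fl.2 (sub1.getD fl.2 0 + 1))) = pvStepA d fl := by
  unfold pvStepA
  by_cases h : d.contains fl.1 = true
  · simp only [h, if_true]
    exact congrArg (PySem.Dict.insert d fl.1) (pvBump (d.getD fl.1 PySem.Dict.empty) fl.2)
  · simp only [h, Bool.false_eq_true, if_false, PySem.Dict.getD_insert_self,
      PySem.Dict.contains_empty, PySem.Dict.insert_insert_self]
    rw [PySem.Dict.getD_of_not_contains d PySem.Dict.empty (by simpa using h),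
      PySem.Dict.getD_empty]

theorem pvStepB_eq (d : PySem.Dict Int (PySem.Dict String Int)) (q : (Int × String) × Int) :
    (let acc1 := d.setdefault q.1.1 PySem.Dict.empty
     acc1.insert q.1.1 ((acc1.getD q.1.1 PySem.Dict.empty).insert q.1.2 q.2)) = pvStepB d q := by
  unfold pvStepB
  by_cases h : d.contains q.1.1 = true
  · rw [PySem.Dict.setdefault_of_contains _ _ h]
  · rw [PySem.Dict.setdefault_of_not_contains _ _ (by simpa using h)]
    simp only [PySem.Dict.getD_insert_self, PySem.Dict.insert_insert_self]
    rw [PySem.Dict.getD_of_not_contains d PySem.Dict.empty (by simpa using h)]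

theorem pvSeed_items (m : Int) :
    (pvSeed m).items = (pvSeedKeys m).map (fun f => (f, PySem.Dict.empty)) := by
  unfold pvSeed
  have h := PySem.Dict.items_foldl_insert_fresh (pvSeedKeys m) (fun a => a)
    (fun _ => (PySem.Dict.empty : PySem.Dict String Int)) PySem.Dict.empty
    (fun a _ => PySem.Dict.contains_empty a) (by simpa using pvNodup_seedKeys m)
  simpa using h

theorem pvSeed_eq_model (m : Int) : pvSeed m = pvModel m [] := by
  apply PySem.Dict.ext
  rw [pvSeed_items]
  unfold pvModel
  simp only [List.map_nil, PySem.Set.update_nil]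
  rfl

theorem pvReshape_nil (m : Int) (cnt : Int × String → Int) : pvReshape m cnt [] = pvSeed m := by
  apply PySem.Dict.ext
  rw [pvSeed_items]
  unfold pvReshape
  simp only [List.map_nil, PySem.Set.update_nil, List.filter_nil]
  rfl

theorem pvModel_step (m : Int) (xs : List (Int × String)) (x : Int × String) :
    pvModel m (xs ++ [x]) = pvStepA (pvModel m xs) x := by
  obtain ⟨f, l⟩ := x
  unfold pvModel pvStepA
  apply PySem.Dict.ext
  simp only [List.map_append, List.map_cons, List.map_nil]
  rw [pvUpdate_append,
    pvGetD_mk_map (PySem.Set.update (pvSeedKeys m) (xs.map (·.1)))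
      (fun k => PySem.Dict.counter (pvLabels xs k)) f PySem.Dict.empty,
    PySem.Dict.items_insert,
    pvContains_mk_map (PySem.Set.update (pvSeedKeys m) (xs.map (·.1)))
      (fun k => PySem.Dict.counter (pvLabels xs k)) f]
  by_cases hf : f ∈ PySem.Set.update (pvSeedKeys m) (xs.map (·.1))
  · rw [pvSet_add_of_mem _ _ hf]
    simp only [hf, decide_true, if_true, List.map_map]
    apply List.map_congr_left
    intro k hk
    by_cases hkf : k = f
    · subst hkf
      simp only [Function.comp_apply, BEq.rfl, if_true]
      rw [pvLabels_append]
      simp [PySem.Dict.counter_append_singleton, PySem.Dict.modify]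
    · have : (k == f) = false := by simpa using hkf
      simp only [Function.comp_apply, this, Bool.false_eq_true, if_false]
      rw [pvLabels_append, if_neg (fun h : f = k => hkf h.symm), List.append_nil]
  · rw [pvSet_add_of_not_mem _ _ hf]
    simp only [hf, decide_false, Bool.false_eq_true, if_false, List.map_append, List.map_cons,
      List.map_nil]
    have hlab0 : pvLabels xs f = [] := by
      unfold pvLabels
      rw [List.filter_eq_nil_iff.mpr, List.map_nil]
      intro q hq
      simp only [beq_iff_eq]
      intro hq1
      exact hf (by
        rw [PySem.Set.mem_update]
        right
        exact List.mem_map.mpr ⟨q, hq, hq1⟩)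
    congr 1
    · apply List.map_congr_left
      intro k hk
      have hkf : f ≠ k := fun h => hf (h ▸ hk)
      rw [pvLabels_append]
      simp [hkf]
    · rw [pvLabels_append]
      simp only [hlab0, List.nil_append]
      rfl

theorem pvFoldlA (m : Int) (pairs : List (Int × String)) :
    pairs.foldl pvStepA (pvSeed m) = pvModel m pairs := by
  induction pairs using List.reverseRecOn with
  | nil => simpa using pvSeed_eq_model m
  | append_singleton xs x ih =>
    rw [List.foldl_append, List.foldl_cons, List.foldl_nil, ih, ← pvModel_step]

theorem pvReshape_step (m : Int) (cnt : Int × String → Int) (T : List (Int × String))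
    (p : Int × String) (hp : p ∉ T) :
    pvReshape m cnt (T ++ [p]) = pvStepB (pvReshape m cnt T) (p, cnt p) := by
  unfold pvReshape pvStepB
  apply PySem.Dict.ext
  simp only [List.map_append, List.map_cons, List.map_nil]
  rw [pvUpdate_append,
    pvGetD_mk_map (PySem.Set.update (pvSeedKeys m) (T.map (·.1)))
      (fun k => PySem.Dict.mk ((T.filter (fun q => q.1 == k)).map (fun q => (q.2, cnt q)))) p.1
      PySem.Dict.empty,
    PySem.Dict.items_insert,
    pvContains_mk_map (PySem.Set.update (pvSeedKeys m) (T.map (·.1)))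
      (fun k => PySem.Dict.mk ((T.filter (fun q => q.1 == k)).map (fun q => (q.2, cnt q)))) p.1]
  by_cases hf : p.1 ∈ PySem.Set.update (pvSeedKeys m) (T.map (·.1))
  · rw [pvSet_add_of_mem _ _ hf]
    simp only [hf, decide_true, if_true, List.map_map]
    apply List.map_congr_left
    intro k hk
    by_cases hkf : k = p.1
    · subst hkf
      simp only [Function.comp_apply, BEq.rfl, if_true]
      have hc : (PySem.Dict.mk ((T.filter (fun q => q.1 == p.1)).map
          (fun q => (q.2, cnt q)))).contains p.2 = false := by
        rw [PySem.Dict.contains_mk, List.any_map, List.any_eq_false]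
        intro q hq
        have hq' := List.mem_filter.mp hq
        have h1 : q.1 = p.1 := by simpa using hq'.2
        simp only [Function.comp_apply, beq_iff_eq]
        intro h2
        exact hp ((Prod.ext h1 h2) ▸ hq'.1)
      congr 1
      apply PySem.Dict.ext
      rw [PySem.Dict.items_insert_of_not_contains _ _ hc, pvFilterKey_append]
      simp
    · have : (k == p.1) = false := by simpa using hkf
      simp only [Function.comp_apply, this, Bool.false_eq_true, if_false]
      rw [pvFilterKey_append, if_neg (fun h : p.1 = k => hkf h.symm), List.append_nil]
  · rw [pvSet_add_of_not_mem _ _ hf]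
    simp only [hf, decide_false, Bool.false_eq_true, if_false, List.map_append, List.map_cons,
      List.map_nil]
    have hT0 : T.filter (fun q => q.1 == p.1) = [] := by
      rw [List.filter_eq_nil_iff]
      intro q hq
      simp only [beq_iff_eq]
      intro hq1
      exact hf (by
        rw [PySem.Set.mem_update]
        right
        exact List.mem_map.mpr ⟨q, hq, hq1⟩)
    congr 1
    · apply List.map_congr_left
      intro k hk
      have hkf : p.1 ≠ k := fun h => hf (h ▸ hk)
      rw [pvFilterKey_append]
      simp [hkf]
    · rw [pvFilterKey_append]
      simp only [hT0, List.nil_append]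
      rfl

theorem pvFoldlB (m : Int) (cnt : Int × String → Int) (S : List (Int × String)) (hS : S.Nodup) :
    (S.map (fun p => (p, cnt p))).foldl pvStepB (pvSeed m) = pvReshape m cnt S := by
  induction S using List.reverseRecOn with
  | nil => simpa using (pvReshape_nil m cnt).symm
  | append_singleton T p ih =>
    have h1 : T.Nodup ∧ p ∉ T := by
      rw [List.nodup_append] at hS
      exact ⟨hS.1, fun hm => (hS.2.2 p hm p (by simp)) rfl⟩
    rw [List.map_append, List.foldl_append, List.map_cons, List.map_nil, List.foldl_cons,
      List.foldl_nil, ih h1.1, ← pvReshape_step m cnt T p h1.2]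

theorem pvOfList_map_ofList {α β : Type} [BEq α] [LawfulBEq α] [BEq β] [LawfulBEq β]
    (g : α → β) (l : List α) :
    PySem.Set.ofList ((PySem.Set.ofList l).map g) = PySem.Set.ofList (l.map g) := by
  induction l using List.reverseRecOn with
  | nil => rfl
  | append_singleton t x ih =>
    rw [pvOfList_append, List.map_append, List.map_cons, List.map_nil, pvOfList_append]
    by_cases h : x ∈ t
    · rw [pvSet_add_of_mem _ _ ((PySem.Set.mem_ofList t x).mpr h), ih,
        pvSet_add_of_mem _ _ ((PySem.Set.mem_ofList _ _).mpr (List.mem_map.mpr ⟨x, h, rfl⟩))]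
    · rw [pvSet_add_of_not_mem _ _ (fun hc => h ((PySem.Set.mem_ofList t x).mp hc)),
        List.map_append, List.map_cons, List.map_nil, pvOfList_append, ih]

theorem pvFilter_ofList {α : Type} [BEq α] [LawfulBEq α] (p : α → Bool) (l : List α) :
    (PySem.Set.ofList l).filter p = PySem.Set.ofList (l.filter p) := by
  induction l using List.reverseRecOn with
  | nil => rfl
  | append_singleton t x ih =>
    rw [pvOfList_append, List.filter_append]
    by_cases hm : x ∈ t
    · rw [pvSet_add_of_mem _ _ ((PySem.Set.mem_ofList t x).mpr hm), ih]
      by_cases hp : p x = true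
      · rw [show List.filter p [x] = [x] by simp [hp], pvOfList_append,
          pvSet_add_of_mem _ _ ((PySem.Set.mem_ofList _ _).mpr (List.mem_filter.mpr ⟨hm, hp⟩))]
      · rw [show List.filter p [x] = [] by simp [hp], List.append_nil]
    · rw [pvSet_add_of_not_mem _ _ (fun hc => hm ((PySem.Set.mem_ofList t x).mp hc)),
        List.filter_append, ih]
      by_cases hp : p x = true
      · rw [show List.filter p [x] = [x] by simp [hp], pvOfList_append,
          pvSet_add_of_not_mem]
        intro hc
        exact hm (List.mem_of_mem_filter ((PySem.Set.mem_ofList _ _).mp hc))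
      · rw [show List.filter p [x] = [] by simp [hp], List.append_nil, List.append_nil]

theorem pvMap_snd_ofList (f : Int) (l : List (Int × String)) (hl : ∀ q ∈ l, q.1 = f) :
    (PySem.Set.ofList l).map (·.2) = PySem.Set.ofList (l.map (·.2)) := by
  induction l using List.reverseRecOn with
  | nil => rfl
  | append_singleton t x ih =>
    have hlt : ∀ q ∈ t, q.1 = f := fun q hq => hl q (List.mem_append_left _ hq)
    have hx : x.1 = f := hl x (by simp)
    rw [pvOfList_append, List.map_append, List.map_cons, List.map_nil, pvOfList_append]
    by_cases hm : x ∈ t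
    · rw [pvSet_add_of_mem _ _ ((PySem.Set.mem_ofList t x).mpr hm), ih hlt,
        pvSet_add_of_mem _ _ ((PySem.Set.mem_ofList _ _).mpr (List.mem_map.mpr ⟨x, hm, rfl⟩))]
    · have hm2 : x.2 ∉ t.map (·.2) := by
        intro hc
        obtain ⟨q, hq, hq2⟩ := List.mem_map.mp hc
        have : q = x := Prod.ext (by rw [hlt q hq, hx]) hq2
        exact hm (this ▸ hq)
      rw [pvSet_add_of_not_mem _ _ (fun hc => hm ((PySem.Set.mem_ofList t x).mp hc)),
        List.map_append, List.map_cons, List.map_nil, ih hlt,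
        pvSet_add_of_not_mem _ _ (fun hc => hm2 ((PySem.Set.mem_ofList _ _).mp hc))]

theorem pvCount (pairs : List (Int × String)) (f : Int) (b : String) :
    List.count b (pvLabels pairs f) = List.count (f, b) pairs := by
  unfold pvLabels
  rw [List.count_eq_countP, List.countP_map, List.countP_filter, List.count_eq_countP]
  apply List.countP_congr
  intro q _
  simp [Function.comp, Bool.and_eq_true, beq_iff_eq, Prod.ext_iff, and_comm]

theorem pvInner (pairs : List (Int × String)) (f : Int) :
    PySem.Dict.mk (((PySem.Set.ofList pairs).filter (fun q => q.1 == f)).map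
        (fun q => (q.2, (List.count q pairs : Int))))
      = PySem.Dict.counter (pvLabels pairs f) := by
  apply PySem.Dict.ext
  rw [PySem.Dict.items_counter]
  show (((PySem.Set.ofList pairs).filter (fun q => q.1 == f)).map
      (fun q => (q.2, (List.count q pairs : Int))))
    = (PySem.Set.ofList (pvLabels pairs f)).map (fun k => (k, (List.count k (pvLabels pairs f) : Int)))
  have hmem : ∀ q ∈ PySem.Set.ofList (pairs.filter (fun q => q.1 == f)), q.1 = f := by
    intro q hq
    have := (PySem.Set.mem_ofList _ _).mp hq
    simpa using (List.mem_filter.mp this).2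
  have hmem' : ∀ q ∈ pairs.filter (fun q => q.1 == f), q.1 = f := by
    intro q hq
    simpa using (List.mem_filter.mp hq).2
  rw [pvFilter_ofList]
  conv_rhs => rw [show pvLabels pairs f = (pairs.filter (fun q => q.1 == f)).map (·.2) from rfl]
  rw [← pvMap_snd_ofList f _ hmem', List.map_map]
  apply List.map_congr_left
  intro q hq
  have hqf : q.1 = f := hmem q hq
  show ((q.2 : String), (List.count q pairs : Int)) = (q.2, (List.count q.2 (pvLabels pairs f) : Int))
  rw [pvCount pairs f q.2]
  have : (f, q.2) = q := Prod.ext hqf.symm rfl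
  rw [this]

theorem pvBridge (m : Int) (pairs : List (Int × String)) :
    pvReshape m (fun p => (List.count p pairs : Int)) (PySem.Set.ofList pairs) = pvModel m pairs := by
  unfold pvReshape pvModel
  have houter : PySem.Set.update (pvSeedKeys m) ((PySem.Set.ofList pairs).map (·.1))
      = PySem.Set.update (pvSeedKeys m) (pairs.map (·.1)) := by
    rw [PySem.Set.update_eq_append_filter, PySem.Set.update_eq_append_filter,
      pvOfList_map_ofList]
  rw [houter]
  congr 1
  apply List.map_congr_left
  intro f _
  exact congrArg (fun d => (f, d)) (pvInner pairs f)

theorem pvA_eq (all : List (String × List (Int × String))) (m : Int) :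
    count_frame_labels all m = (pvModel m (pvPairs all m)).items.map (fun p => (p.1, p.2.items)) := by
  simp only [count_frame_labels]
  congr 1
  have hbody : (fun (acc : PySem.Dict Int (PySem.Dict String Int)) (fl : Int × String) =>
      if fl.1 ≥ m then acc
      else
        let acc1 := if acc.contains fl.1 then acc else acc.insert fl.1 PySem.Dict.empty
        let sub := acc1.getD fl.1 PySem.Dict.empty
        let sub1 := if sub.contains fl.2 then sub else sub.insert fl.2 0
        acc1.insert fl.1 (sub1.insert fl.2 (sub1.getD fl.2 0 + 1)))
      = (fun acc fl => if decide (fl.1 < m) = true then pvStepA acc fl else acc) := by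
    funext acc fl
    by_cases h : fl.1 < m
    · rw [if_neg (show ¬(fl.1 ≥ m) by omega),
        if_pos (show decide (fl.1 < m) = true by simpa using h)]
      exact pvStepA_eq acc fl
    · rw [if_pos (show fl.1 ≥ m by omega),
        if_neg (show ¬(decide (fl.1 < m) = true) by simpa using h)]
  rw [hbody, ← pvFoldlA m (pvPairs all m)]
  unfold pvPairs pvSeed pvSeedKeys
  rw [List.foldl_flatMap]
  have hfun : (fun (acc : PySem.Dict Int (PySem.Dict String Int))
        (kv : String × List (Int × String)) =>
      List.foldl (fun acc fl => if decide (fl.1 < m) = true then pvStepA acc fl else acc) acc kv.2)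
    = (fun acc kv => List.foldl pvStepA acc (kv.2.filter (fun fl => decide (fl.1 < m)))) := by
    funext acc kv
    exact List.foldl_filter.symm
  rw [hfun]

theorem pvB_eq (all : List (String × List (Int × String))) (m : Int) :
    count_frame_labels_alt all m = (pvModel m (pvPairs all m)).items.map (fun p => (p.1, p.2.items)) := by
  simp only [count_frame_labels_alt]
  congr 1
  have hstep : (fun (acc : PySem.Dict Int (PySem.Dict String Int)) (q : (Int × String) × Int) =>
      let acc1 := acc.setdefault q.1.1 PySem.Dict.empty
      acc1.insert q.1.1 ((acc1.getD q.1.1 PySem.Dict.empty).insert q.1.2 q.2)) = pvStepB := by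
    funext acc q
    exact pvStepB_eq acc q
  rw [hstep, PySem.Dict.foldl_insert_getD_add_one_eq_counter, PySem.Dict.items_counter]
  have := pvFoldlB m (fun p => (List.count p (pvPairs all m) : Int))
    (PySem.Set.ofList (pvPairs all m)) (PySem.Set.nodup_ofList _)
  unfold pvPairs pvSeed pvSeedKeys at *
  rw [this, pvBridge]

-- ===== VERDICT (by name: the statement is the Claim_ definition above) =====
theorem count_frame_labels_spec : Claim_equal_count_frame_labels := by
  intro all m _
  unfold Spec_count_frame_labels
  rw [pvA_eq, pvB_eq]
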